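-- pv_equiv track=rewrite | github.com/minknown/clawjuc | python/quartz_timer.py | _parse_field
-- ===== SOURCE A (Python) =====
-- from typing import Callable, Dict, List, Optional, Tuple
--
-- def _parse_field(part: str, min_val: int, max_val: int) -> List[int]:
--     """Parse a single cron field into a list of matching values."""
--     values = set()
--     for segment in part.split(","):
--         if segment == "*":
--             values.update(range(min_val, max_val + 1))
--         elif "/" in segment:
--             base, step = segment.split("/", 1)
--             step = int(step)
--             start = min_val if base == "*" else int(base)
--             values.update(range(start, max_val + 1, step))
--         elif "-" in segment:
--             start, end = segment.split("-", 1)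
--             values.update(range(int(start), int(end) + 1))
--         else:
--             values.add(int(segment))
--     return sorted(v for v in values if min_val <= v <= max_val)
-- ===== SOURCE B (Python) =====
-- from typing import List, Tuple
--
--
-- def _segment_spec(segment: str, min_val: int, max_val: int) -> Tuple[int, int, int]:
--     """Parse one comma segment into an arithmetic-progression spec (start, last, step)."""
--     if segment == "*":
--         return (min_val, max_val, 1)
--     elif "/" in segment:
--         base, step = segment.split("/", 1)
--         step = int(step)
--         start = min_val if base == "*" else int(base)
--         return (start, max_val, step)
--     elif "-" in segment:
--         lo, hi = segment.split("-", 1)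
--         return (int(lo), int(hi), 1)
--     else:
--         v = int(segment)
--         return (v, v, 1)
--
--
-- def _spec_run(spec: Tuple[int, int, int], min_val: int, max_val: int) -> List[int]:
--     """The spec's values clipped to [min_val, max_val], as an ascending list."""
--     start, last, step = spec
--     if step > 0:
--         if start < min_val:
--             start += -((start - min_val) // step) * step
--         return list(range(start, min(last, max_val) + 1, step))
--     else:
--         return []
--
--
-- def _merge_dedup(xs: List[int], ys: List[int]) -> List[int]:
--     """Merge two strictly increasing lists into one, dropping duplicates."""
--     out = []
--     i = j = 0
--     while i < len(xs) and j < len(ys):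
--         if xs[i] < ys[j]:
--             out.append(xs[i]); i += 1
--         elif ys[j] < xs[i]:
--             out.append(ys[j]); j += 1
--         else:
--             out.append(xs[i]); i += 1; j += 1
--     out.extend(xs[i:])
--     out.extend(ys[j:])
--     return out
--
--
-- def _parse_field(part: str, min_val: int, max_val: int) -> List[int]:
--     """Parse a single cron field into a list of matching values."""
--     specs = [_segment_spec(segment, min_val, max_val) for segment in part.split(",")]
--     out = []
--     for spec in specs:
--         out = _merge_dedup(out, _spec_run(spec, min_val, max_val))
--     return out
-- ===== Notes on version B (the rewrite author's own statement) =====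
-- stated objective: alternative
-- what changed: B parses each comma segment into an arithmetic-progression spec (start, last, step), clips each spec to an ascending run inside [min_val, max_val], and folds a two-list merge-with-dedup over the runs, so the sorted deduplicated output is produced directly with no set and no sort call.
import Mathlib
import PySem

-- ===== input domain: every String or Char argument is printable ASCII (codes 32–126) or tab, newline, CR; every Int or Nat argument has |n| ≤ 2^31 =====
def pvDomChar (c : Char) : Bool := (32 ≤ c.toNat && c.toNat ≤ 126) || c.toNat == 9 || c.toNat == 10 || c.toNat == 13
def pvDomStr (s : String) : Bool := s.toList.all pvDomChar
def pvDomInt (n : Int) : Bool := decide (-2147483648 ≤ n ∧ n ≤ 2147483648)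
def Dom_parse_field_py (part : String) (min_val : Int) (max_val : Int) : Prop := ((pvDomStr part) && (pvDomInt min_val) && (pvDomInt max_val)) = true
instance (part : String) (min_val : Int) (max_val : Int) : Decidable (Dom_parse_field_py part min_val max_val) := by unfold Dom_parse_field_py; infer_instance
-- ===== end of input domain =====

-- B parses each comma segment into an arithmetic-progression spec and emits the result by a
-- single ascending scan of [min_val, max_val], with no set and no sort (objective: alternative).


-- ===== PORT A =====
-- per-segment body of A's loop: the list of values one segment adds to the set
-- (none exactly where the Python raises ValueError: bad int(), or step == 0 in range())
def segValsA? (seg : String) (min_val max_val : Int) : Option (List Int) :=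
  if seg = "*" then some (PySem.List.pyRange min_val (max_val + 1) 1)
  else if PySem.Str.isIn "/" seg then
    match PySem.Str.splitMax? seg "/" 1 with
    | some [base, stepS] =>
      match PySem.Int.ofStr? stepS with
      | some step =>
        match (if base = "*" then some min_val else PySem.Int.ofStr? base) with
        | some start =>
          if step = 0 then none  -- range(_, _, 0) raises ValueError
          else some (PySem.List.pyRange start (max_val + 1) step)
        | none => none
      | none => none
    | _ => none
  else if PySem.Str.isIn "-" seg then
    match PySem.Str.splitMax? seg "-" 1 with
    | some [lo, hi] =>
      match PySem.Int.ofStr? lo, PySem.Int.ofStr? hi with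
      | some s, some e => some (PySem.List.pyRange s (e + 1) 1)
      | _, _ => none
    | _ => none
  else (PySem.Int.ofStr? seg).map (fun v => [v])

def parse_field_py (part : String) (min_val : Int) (max_val : Int) : List Int :=
  let segs := (PySem.Str.split? part ",").getD []   -- "," ≠ "", so split? never fails
  let values := segs.foldl
    (fun acc seg => acc.bind (fun s => (segValsA? seg min_val max_val).map (PySem.Set.update s)))
    (some (PySem.Set.empty : PySem.Set Int))
  match values with
  | none => []
  | some s =>
    PySem.List.sorted (s.filter (fun v => decide (min_val ≤ v) && decide (v ≤ max_val))) (fun v => v)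

-- ===== PORT B =====
-- port of Source B's _segment_spec
def segSpecB? (seg : String) (min_val max_val : Int) : Option (Int × Int × Int) :=
  if seg = "*" then some (min_val, max_val, 1)
  else if PySem.Str.isIn "/" seg then
    match PySem.Str.splitMax? seg "/" 1 with
    | some [base, stepS] =>
      match PySem.Int.ofStr? stepS with
      | some step =>
        match (if base = "*" then some min_val else PySem.Int.ofStr? base) with
        | some start => some (start, max_val, step)
        | none => none
      | none => none
    | _ => none
  else if PySem.Str.isIn "-" seg then
    match PySem.Str.splitMax? seg "-" 1 with
    | some [lo, hi] =>
      match PySem.Int.ofStr? lo, PySem.Int.ofStr? hi with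
      | some l, some h => some (l, h, 1)
      | _, _ => none
    | _ => none
  else (PySem.Int.ofStr? seg).map (fun v => (v, v, 1))

-- port of Source B's _spec_run: the spec's values clipped to [min_val, max_val], ascending
def specRun (t : Int × Int × Int) (min_val max_val : Int) : List Int :=
  if 0 < t.2.2 then
    let start := if t.1 < min_val
      then t.1 + -(PySem.Int.floordiv (t.1 - min_val) t.2.2) * t.2.2
      else t.1
    PySem.List.pyRange start (min t.2.1 max_val + 1) t.2.2
  else []

-- port of Source B's _merge_dedup: merge two strictly increasing lists, dropping duplicates
def mergeDedup : List Int → List Int → List Int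
  | [], ys => ys
  | x :: xs, [] => x :: xs
  | x :: xs, y :: ys =>
    if x < y then x :: mergeDedup xs (y :: ys)
    else if y < x then y :: mergeDedup (x :: xs) ys
    else x :: mergeDedup xs ys

def parse_field_py_alt (part : String) (min_val : Int) (max_val : Int) : List Int :=
  let segs := (PySem.Str.split? part ",").getD []
  let specs := segs.foldl
    (fun acc seg => acc.bind (fun sp => (segSpecB? seg min_val max_val).map (fun t => sp ++ [t])))
    (some ([] : List (Int × Int × Int)))
  match specs with
  | none => []
  | some sp => sp.foldl (fun out t => mergeDedup out (specRun t min_val max_val)) []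

-- ===== PRECONDITION & SPEC =====
-- one segment parses without a ValueError (every int() succeeds; step of a "/" segment ≠ 0)
def segOk (seg : String) : Bool :=
  if seg = "*" then true
  else if PySem.Str.isIn "/" seg then
    match PySem.Str.splitMax? seg "/" 1 with
    | some [base, stepS] =>
      match PySem.Int.ofStr? stepS with
      | some step => step != 0 && (base == "*" || (PySem.Int.ofStr? base).isSome)
      | none => false
    | _ => false
  else if PySem.Str.isIn "-" seg then
    match PySem.Str.splitMax? seg "-" 1 with
    | some [lo, hi] => (PySem.Int.ofStr? lo).isSome && (PySem.Int.ofStr? hi).isSome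
    | _ => false
  else (PySem.Int.ofStr? seg).isSome

-- Pre_ excludes exactly the inputs where A raises ValueError (a segment whose int() fails,
-- e.g. '', 'x', '-5--1', or a '/' segment with step 0)
def Pre_parse_field_py (part : String) (min_val : Int) (max_val : Int) : Prop :=
  ∀ seg ∈ (PySem.Str.split? part ",").getD [], segOk seg = true
instance (part : String) (min_val : Int) (max_val : Int) : Decidable (Pre_parse_field_py part min_val max_val) := by unfold Pre_parse_field_py; infer_instance

def pvWitness_parse_field_py : String × Int × Int := ("1-3,*/2,7", 0, 10)

def Spec_parse_field_py (part : String) (min_val : Int) (max_val : Int) (out : List Int) : Prop := out = parse_field_py_alt part min_val max_val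
instance (part : String) (min_val : Int) (max_val : Int) (out : List Int) : Decidable (Spec_parse_field_py part min_val max_val out) := by unfold Spec_parse_field_py; infer_instance

-- ===== CLAIM (what is proved, stated in full; the proofs are below) =====
def Claim_equal_parse_field_py : Prop := ∀ (part : String) (min_val : Int) (max_val : Int), Dom_parse_field_py part min_val max_val → Pre_parse_field_py part min_val max_val → Spec_parse_field_py part min_val max_val (parse_field_py part min_val max_val)

-- ===== LEMMAS AND PROOFS =====

-- (proof-side) does spec (start, last, step) match v?
def specHit (t : Int × Int × Int) (v : Int) : Bool :=
  decide (0 < t.2.2) && decide (t.1 ≤ v) && decide (v ≤ t.2.1) && (PySem.Int.mod (v - t.1) t.2.2 == 0)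


-- a negative-step Python range only yields values strictly above its stop
lemma mem_pyRange_neg_gt {a b s v : Int} (hs : s < 0) (h : v ∈ PySem.List.pyRange a b s) : b < v := by
  unfold PySem.List.pyRange at h
  have hs0 : ¬ s = 0 := by omega
  have hs1 : ¬ 0 < s := by omega
  simp only [hs0, if_false, hs1] at h
  by_cases hba : b < a
  · simp only [hba, if_true, List.mem_map, List.mem_range] at h
    obtain ⟨k, hk, rfl⟩ := h
    have hkX : (k : Int) < (a - b + -s - 1) / (-s) := Int.lt_toNat.mp hk
    have h1 : ((k : Int) + 1) * (-s) ≤ a - b + -s - 1 :=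
      (Int.le_ediv_iff_mul_le (by omega)).mp (by omega)
    nlinarith [h1]
  · simp [hba] at h

-- a spec with step 1 matches exactly the closed interval [lo, hi]
lemma specHit_one (lo hi v : Int) : specHit (lo, hi, 1) v = true ↔ lo ≤ v ∧ v ≤ hi := by
  simp [specHit]

lemma mem_pyRange_one_succ (lo hi v : Int) : v ∈ PySem.List.pyRange lo (hi + 1) 1 ↔ lo ≤ v ∧ v ≤ hi := by
  rw [PySem.List.mem_pyRange_one]; omega

-- per-segment correspondence: when segOk holds, A's value list and B's spec agree on [min,max]
lemma seg_good (seg : String) (min_val max_val : Int) (h : segOk seg = true) :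
    ∃ L t, segValsA? seg min_val max_val = some L ∧ segSpecB? seg min_val max_val = some t ∧
      ∀ v : Int, min_val ≤ v → v ≤ max_val → (v ∈ L ↔ specHit t v = true) := by
  unfold segOk at h
  unfold segValsA? segSpecB?
  by_cases h1 : seg = "*"
  · simp only [h1, if_true]
    exact ⟨_, _, rfl, rfl, fun v hv1 hv2 => by
      rw [mem_pyRange_one_succ, specHit_one]⟩
  · simp only [h1, if_false] at h ⊢
    by_cases h2 : PySem.Str.isIn "/" seg = true
    · simp only [h2, if_true] at h ⊢
      match hsp : PySem.Str.splitMax? seg "/" 1 with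
      | none => rw [hsp] at h; exact absurd h (by simp)
      | some [] => rw [hsp] at h; exact absurd h (by simp)
      | some [x] => rw [hsp] at h; exact absurd h (by simp)
      | some (x :: y :: z :: rest) => rw [hsp] at h; exact absurd h (by simp)
      | some [base, stepS] =>
        rw [hsp] at h
        dsimp only at h ⊢
        match hst : PySem.Int.ofStr? stepS with
        | none => rw [hst] at h; exact absurd h (by simp)
        | some step =>
          rw [hst] at h
          have hstep : step ≠ 0 := by
            simp only [Bool.and_eq_true, bne_iff_ne] at h; exact h.1
          match hb : (if base = "*" then some min_val else PySem.Int.ofStr? base) with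
          | none =>
            exfalso
            simp only [Bool.and_eq_true, Bool.or_eq_true, beq_iff_eq] at h
            rcases h.2 with hb2 | hb2
            · rw [hb2] at hb; simp at hb
            · by_cases hbb : base = "*"
              · rw [if_pos hbb] at hb; simp at hb
              · rw [if_neg hbb] at hb; rw [hb] at hb2; simp at hb2
          | some start =>
            simp only [if_neg hstep]
            refine ⟨_, _, rfl, rfl, fun v hv1 hv2 => ?_⟩
            by_cases hpos : 0 < step
            · rw [PySem.List.mem_pyRange_iff_of_pos hpos]
              simp only [specHit, Bool.and_eq_true, decide_eq_true_eq, beq_iff_eq,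
                PySem.Int.mod_eq_zero_iff_dvd]
              constructor
              · rintro ⟨ha, hb', hc⟩; exact ⟨⟨⟨hpos, ha⟩, by omega⟩, hc⟩
              · rintro ⟨⟨⟨_, ha⟩, hb'⟩, hc⟩; exact ⟨ha, by omega, hc⟩
            · have hneg : step < 0 := by omega
              constructor
              · intro hmem
                have := mem_pyRange_neg_gt hneg hmem
                omega
              · intro hhit
                simp only [specHit, Bool.and_eq_true, decide_eq_true_eq] at hhit
                exact absurd hhit.1.1.1 hpos
    · simp only [h2, if_false, Bool.false_eq_true] at h ⊢
      by_cases h3 : PySem.Str.isIn "-" seg = true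
      · simp only [h3, if_true] at h ⊢
        match hsp : PySem.Str.splitMax? seg "-" 1 with
        | none => rw [hsp] at h; exact absurd h (by simp)
        | some [] => rw [hsp] at h; exact absurd h (by simp)
        | some [x] => rw [hsp] at h; exact absurd h (by simp)
        | some (x :: y :: z :: rest) => rw [hsp] at h; exact absurd h (by simp)
        | some [lo, hi] =>
          rw [hsp] at h
          dsimp only at h ⊢
          match hl : PySem.Int.ofStr? lo, hh : PySem.Int.ofStr? hi with
          | none, _ => rw [hl] at h; simp at h
          | some l, none => rw [hl, hh] at h; simp at h
          | some l, some hgh =>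
            exact ⟨_, _, rfl, rfl, fun v hv1 hv2 => by
              rw [mem_pyRange_one_succ, specHit_one]⟩
      · simp only [h3, if_false, Bool.false_eq_true] at h ⊢
        match hv0 : PySem.Int.ofStr? seg with
        | none => rw [hv0] at h; simp at h
        | some w =>
          refine ⟨[w], (w, w, 1), rfl, rfl, fun v hv1 hv2 => ?_⟩
          rw [specHit_one]
          simp
          omega

-- joint loop invariant: the set A has built and the spec list B has built agree on [min,max]
lemma fold_inv (min_val max_val : Int) :
    ∀ (segs : List String) (s : PySem.Set Int) (sp : List (Int × Int × Int)),
      (∀ seg ∈ segs, segOk seg = true) → s.Nodup →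
      (∀ v, min_val ≤ v → v ≤ max_val → (v ∈ s ↔ sp.any (fun t => specHit t v) = true)) →
      ∃ s' sp',
        segs.foldl (fun acc seg => acc.bind (fun s => (segValsA? seg min_val max_val).map (PySem.Set.update s))) (some s) = some s' ∧
        segs.foldl (fun acc seg => acc.bind (fun sp => (segSpecB? seg min_val max_val).map (fun t => sp ++ [t]))) (some sp) = some sp' ∧
        s'.Nodup ∧ ∀ v, min_val ≤ v → v ≤ max_val → (v ∈ s' ↔ sp'.any (fun t => specHit t v) = true) := by
  intro segs
  induction segs with
  | nil => exact fun s sp _ hnd hinv => ⟨s, sp, rfl, rfl, hnd, hinv⟩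
  | cons seg rest ih =>
    intro s sp hok hnd hinv
    obtain ⟨L, t, hA, hB, hiff⟩ := seg_good seg min_val max_val (hok seg (by simp))
    have hrest : ∀ sg ∈ rest, segOk sg = true := fun sg hm => hok sg (by simp [hm])
    obtain ⟨s', sp', hA', hB', hnd', hinv'⟩ := ih (PySem.Set.update s L) (sp ++ [t]) hrest
      (PySem.Set.nodup_update s L hnd)
      (fun v hv1 hv2 => by
        rw [PySem.Set.mem_update, hinv v hv1 hv2, List.any_append]
        simp [hiff v hv1 hv2])
    exact ⟨s', sp', by simp only [List.foldl_cons, hA, Option.bind_some, Option.map_some]; exact hA',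
      by simp only [List.foldl_cons, hB, Option.bind_some, Option.map_some]; exact hB', hnd', hinv'⟩


-- merging two strictly increasing lists: members and order
lemma mem_mergeDedup (xs ys : List Int) (v : Int) :
    v ∈ mergeDedup xs ys ↔ v ∈ xs ∨ v ∈ ys := by
  fun_induction mergeDedup xs ys with
  | case1 => simp
  | case2 => simp
  | case3 x xs y ys hxy ih => simp [mergeDedup, hxy, ih]; tauto
  | case4 x xs y ys hxy hyx ih => simp [mergeDedup, hxy, hyx, ih]; tauto
  | case5 x xs y ys hxy hyx ih =>
    have hxy' : x = y := by omega
    simp [mergeDedup, hxy, hyx, ih, hxy']; tauto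

lemma pairwise_mergeDedup (xs ys : List Int)
    (hx : xs.Pairwise (· < ·)) (hy : ys.Pairwise (· < ·)) :
    (mergeDedup xs ys).Pairwise (· < ·) := by
  fun_induction mergeDedup xs ys with
  | case1 => exact hy
  | case2 => exact hx
  | case3 x xs y ys hxy ih =>
    rw [List.pairwise_cons] at hx
    refine List.pairwise_cons.mpr ⟨?_, ih hx.2 hy⟩
    intro z hz
    rcases (mem_mergeDedup _ _ _).mp hz with hzx | hzy
    · exact hx.1 z hzx
    · rcases List.mem_cons.mp hzy with rfl | hzys
      · exact hxy
      · exact lt_trans hxy ((List.pairwise_cons.mp hy).1 z hzys)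
  | case4 x xs y ys hxy hyx ih =>
    rw [List.pairwise_cons] at hy
    refine List.pairwise_cons.mpr ⟨?_, ih hx hy.2⟩
    intro z hz
    rcases (mem_mergeDedup _ _ _).mp hz with hzx | hzy
    · rcases List.mem_cons.mp hzx with rfl | hzxs
      · exact hyx
      · exact lt_trans hyx ((List.pairwise_cons.mp hx).1 z hzxs)
    · exact hy.1 z hzy
  | case5 x xs y ys hxy hyx ih =>
    have hxy' : x = y := by omega
    rw [List.pairwise_cons] at hx hy
    refine List.pairwise_cons.mpr ⟨?_, ih hx.2 hy.2⟩
    intro z hz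
    rcases (mem_mergeDedup _ _ _).mp hz with hzx | hzy
    · exact hx.1 z hzx
    · exact hxy' ▸ hy.1 z hzy

-- the clipped run of a spec holds exactly the in-range values the spec matches
lemma mem_specRun (t : Int × Int × Int) (mn mx v : Int) :
    v ∈ specRun t mn mx ↔ (mn ≤ v ∧ v ≤ mx ∧ specHit t v = true) := by
  obtain ⟨a, l, st⟩ := t
  unfold specRun specHit
  by_cases hst : 0 < st
  · simp only [hst, if_true]
    rw [PySem.List.mem_pyRange_iff_of_pos hst]
    simp only [decide_eq_true_eq, Bool.and_eq_true, beq_iff_eq,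
      PySem.Int.mod_eq_zero_iff_dvd]
    by_cases ha : a < mn
    · simp only [ha, if_true]
      rw [PySem.Int.floordiv_eq_ediv_of_pos hst]
      set P := (a - mn) / st * st with hP
      have hdvdP : st ∣ P := Dvd.intro_left _ rfl
      have hPr : st * ((a - mn) / st) + (a - mn) % st = a - mn := Int.ediv_add_emod _ _
      have hr0 : 0 ≤ (a - mn) % st := Int.emod_nonneg _ (by omega)
      have hrlt : (a - mn) % st < st := Int.emod_lt_of_pos _ hst
      have hPe : st * ((a - mn) / st) = P := by rw [hP]; ring
      have hstart : a + -((a - mn) / st) * st = a - P := by rw [hP]; ring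
      rw [hstart]
      have hdvd_iff : st ∣ v - (a - P) ↔ st ∣ v - a := by
        constructor
        · intro h
          have h2 := dvd_sub h hdvdP
          have he : v - (a - P) - P = v - a := by ring
          rwa [he] at h2
        · intro h; have := dvd_add h hdvdP
          have he : v - a + P = v - (a - P) := by ring
          rwa [he] at this
      constructor
      · rintro ⟨h1, h2, h3⟩
        have hdvd := hdvd_iff.mp h3
        exact ⟨by omega, by omega, ⟨⟨⟨trivial, by omega⟩, by omega⟩, hdvd⟩⟩
      · rintro ⟨h1, h2, ⟨⟨⟨-, h3⟩, h4⟩, hdvd⟩⟩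
        have hdvd' := hdvd_iff.mpr hdvd
        have hge : a - P ≤ v := by
          by_contra hlt
          push_neg at hlt
          have hpos : 0 < (a - P) - v := by omega
          have : st ∣ (a - P) - v := by
            have := dvd_neg.mpr hdvd'
            have he : -(v - (a - P)) = (a - P) - v := by ring
            rwa [he] at this
          have := Int.le_of_dvd hpos this
          omega
        exact ⟨hge, by omega, hdvd'⟩
    · simp only [ha, if_false]
      constructor
      · rintro ⟨h1, h2, h3⟩
        exact ⟨by omega, by omega, ⟨⟨⟨trivial, by omega⟩, by omega⟩, h3⟩⟩
      · rintro ⟨h1, h2, ⟨⟨⟨-, h3⟩, h4⟩, hdvd⟩⟩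
        exact ⟨h3, by omega, hdvd⟩
  · simp only [hst, if_false]
    simp [hst]

-- a clipped run is strictly increasing
lemma pairwise_specRun (t : Int × Int × Int) (mn mx : Int) :
    (specRun t mn mx).Pairwise (· < ·) := by
  obtain ⟨a, l, st⟩ := t
  unfold specRun
  by_cases hst : 0 < st
  · simp only [hst, if_true]
    rw [PySem.List.pyRange_of_pos _ _ hst]
    refine List.Pairwise.map _ ?_ (List.pairwise_lt_range)
    intro k1 k2 hk
    have : (k1 : Int) < (k2 : Int) := by exact_mod_cast hk
    nlinarith
  · simp [hst]

-- folding the merges over the spec list: strictly increasing, members = matched in-range values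
lemma merge_fold (mn mx : Int) :
    ∀ (sp : List (Int × Int × Int)) (out : List Int),
      out.Pairwise (· < ·) →
      (∀ v ∈ out, mn ≤ v ∧ v ≤ mx) →
      (sp.foldl (fun o t => mergeDedup o (specRun t mn mx)) out).Pairwise (· < ·) ∧
      (∀ v ∈ sp.foldl (fun o t => mergeDedup o (specRun t mn mx)) out, mn ≤ v ∧ v ≤ mx) ∧
      (∀ v, v ∈ sp.foldl (fun o t => mergeDedup o (specRun t mn mx)) out ↔
        v ∈ out ∨ (mn ≤ v ∧ v ≤ mx ∧ sp.any (fun t => specHit t v) = true)) := by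
  intro sp
  induction sp with
  | nil => exact fun out hpw hbnd => ⟨hpw, hbnd, fun v => by simp⟩
  | cons t rest ih =>
    intro out hpw hbnd
    have hpw' := pairwise_mergeDedup out (specRun t mn mx) hpw (pairwise_specRun t mn mx)
    have hbnd' : ∀ v ∈ mergeDedup out (specRun t mn mx), mn ≤ v ∧ v ≤ mx := by
      intro v hv
      rcases (mem_mergeDedup _ _ _).mp hv with h | h
      · exact hbnd v h
      · have := (mem_specRun t mn mx v).mp h
        exact ⟨this.1, this.2.1⟩
    obtain ⟨h1, h2, h3⟩ := ih (mergeDedup out (specRun t mn mx)) hpw' hbnd'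
    refine ⟨h1, h2, fun v => ?_⟩
    rw [List.foldl_cons] at *
    rw [h3 v, mem_mergeDedup, mem_specRun]
    simp only [List.any_cons, Bool.or_eq_true]
    constructor
    · rintro ((h | h) | h)
      · exact Or.inl h
      · exact Or.inr ⟨h.1, h.2.1, Or.inl h.2.2⟩
      · exact Or.inr ⟨h.1, h.2.1, Or.inr h.2.2⟩
    · rintro (h | ⟨hv1, hv2, h | h⟩)
      · exact Or.inl (Or.inl h)
      · exact Or.inl (Or.inr ⟨hv1, hv2, h⟩)
      · exact Or.inr ⟨hv1, hv2, h⟩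

-- ===== VERDICT (by name: the statement is the Claim_ definition above) =====
theorem parse_field_py_spec : Claim_equal_parse_field_py := by
  intro part min_val max_val _ hpre
  unfold Spec_parse_field_py parse_field_py parse_field_py_alt
  obtain ⟨s', sp', hA, hB, hnd, hinv⟩ :=
    fold_inv min_val max_val ((PySem.Str.split? part ",").getD []) PySem.Set.empty []
      hpre (by simp [PySem.Set.empty]) (by intro v _ _; simp [PySem.Set.empty])
  simp only [hA, hB]
  obtain ⟨hpw, hbnd, hmem⟩ := merge_fold min_val max_val sp' [] (by simp) (by simp)
  refine PySem.List.sorted_eq_of_perm_of_pairwise_lt _ _ _ ?_ ?_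
  · rw [List.perm_ext_iff_of_nodup (hpw.imp ne_of_lt) (List.Nodup.filter _ hnd)]
    intro v
    rw [hmem v]
    simp only [List.not_mem_nil, false_or, List.mem_filter, Bool.and_eq_true, decide_eq_true_eq]
    constructor
    · rintro ⟨hv1, hv2, hany⟩
      exact ⟨(hinv v hv1 hv2).mpr hany, hv1, hv2⟩
    · rintro ⟨hmem', hv1, hv2⟩
      exact ⟨hv1, hv2, (hinv v hv1 hv2).mp hmem'⟩
  · exact hpw
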